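-- pv_equiv track=rewrite | github.com/hghyhghy/Codechef-Coding-Ninja | Desktop/DSA/T35/7.py | longest_subarry_with_zero_sum
-- ===== SOURCE A (Python) =====
-- def longest_subarry_with_zero_sum(array):
--
--     n=len(array)
--     lenght=0
--
--     for i in range(n):
--
--         current_sum = 0
--
--         for j in range(i,n):
--
--             current_sum += array[j]
--
--             if current_sum == 0:
--
--                 custom_lenght= j-i+1
--
--                 lenght = max(lenght,custom_lenght)
--
--     return lenght
-- ===== SOURCE B (Python) =====
-- def longest_subarry_with_zero_sum(array):
--     # prefix sum + first-occurrence hash map: O(n) instead of A's O(n^2)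
--     first = {0: -1}
--     prefix = 0
--     best = 0
--     for i, x in enumerate(array):
--         prefix += x
--         if prefix in first:
--             best = max(best, i - first[prefix])
--         else:
--             first[prefix] = i
--     return best
-- ===== Notes on version B (the rewrite author's own statement) =====
-- stated objective: faster
-- what changed: replaced the nested loop over all subarrays by a single pass keeping prefix sums and a hash map of each prefix sum's first occurrence index
import Mathlib
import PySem

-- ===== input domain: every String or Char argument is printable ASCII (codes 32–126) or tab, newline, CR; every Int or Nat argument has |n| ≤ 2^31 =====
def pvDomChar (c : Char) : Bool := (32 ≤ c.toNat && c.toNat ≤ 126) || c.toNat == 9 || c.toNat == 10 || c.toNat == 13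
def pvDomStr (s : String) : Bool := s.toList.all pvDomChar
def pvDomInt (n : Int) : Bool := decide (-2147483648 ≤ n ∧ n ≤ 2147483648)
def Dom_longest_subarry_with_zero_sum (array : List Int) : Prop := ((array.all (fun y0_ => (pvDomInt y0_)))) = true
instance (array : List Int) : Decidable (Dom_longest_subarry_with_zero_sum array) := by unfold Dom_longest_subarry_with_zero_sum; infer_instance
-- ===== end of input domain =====

-- B replaces A's O(n^2) nested scan of all subarrays by a single prefx-sum pass
-- with a first-occurrence hash map (objective: faster, asymptotic).

-- ===== PORT A =====
def longest_subarry_with_zero_sum (array : List Int) : Int :=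
  let n : Int := PySem.List.len array
  (PySem.List.pyRange 0 n 1).foldl
    (fun lenght i =>
      ((PySem.List.pyRange i n 1).foldl
        (fun (st : Int × Int) j =>
          let current_sum := st.1 + PySem.List.pyGetD array j 0
          if current_sum = 0 then (current_sum, max st.2 (j - i + 1))
          else (current_sum, st.2))
        (0, lenght)).2)
    0

-- ===== PORT B =====
def longest_subarry_with_zero_sum_alt (array : List Int) : Int :=
  let st := (PySem.List.enumerate array 0).foldl
    (fun (st : PySem.Dict Int Int × Int × Int) ix =>
      let prefx := st.2.1 + ix.2
      match st.1.get? prefx with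
      | some f => (st.1, prefx, max st.2.2 (ix.1 - f))
      | none => (st.1.insert prefx ix.1, prefx, st.2.2))
    ((PySem.Dict.empty : PySem.Dict Int Int).insert 0 (-1), 0, 0)
  st.2.2

-- ===== PRECONDITION & SPEC =====
def Spec_longest_subarry_with_zero_sum (array : List Int) (out : Int) : Prop := out = longest_subarry_with_zero_sum_alt array
instance (array : List Int) (out : Int) : Decidable (Spec_longest_subarry_with_zero_sum array out) := by unfold Spec_longest_subarry_with_zero_sum; infer_instance

-- ===== CLAIM (what is proved, stated in full; the proofs are below) =====
def Claim_equal_longest_subarry_with_zero_sum : Prop := ∀ (array : List Int), Dom_longest_subarry_with_zero_sum array → Spec_longest_subarry_with_zero_sum array (longest_subarry_with_zero_sum array)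

-- ===== LEMMAS AND PROOFS =====

-- prefx sum of the first p elements
def Tps (array : List Int) (p : Nat) : Int := (array.take p).sum

-- d is the length of some zero-sum subarray of `array`
def GoodLen (array : List Int) (d : Int) : Prop :=
  ∃ p q : Nat, p < q ∧ q ≤ array.length ∧ Tps array p = Tps array q ∧ d = (q : Int) - (p : Int)

theorem Tps_succ (array : List Int) (m : Nat) (h : m < array.length) :
    Tps array (m+1) = Tps array m + array[m] := by
  unfold Tps
  rw [List.take_add_one, List.getElem?_eq_getElem h, List.sum_append]
  simp

def stepA (array : List Int) (i : Int) (st : Int × Int) (j : Int) : Int × Int :=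
  let current_sum := st.1 + PySem.List.pyGetD array j 0
  if current_sum = 0 then (current_sum, max st.2 (j - i + 1)) else (current_sum, st.2)

theorem innerA (array : List Int) (i : Nat) (L : Int) :
    ∀ k : Nat, i + k ≤ array.length →
    (((PySem.List.pyRange (i : Int) ((i + k : Nat) : Int) 1).foldl (stepA array i) (0, L)).1
        = Tps array (i+k) - Tps array i)
    ∧ L ≤ ((PySem.List.pyRange (i : Int) ((i + k : Nat) : Int) 1).foldl (stepA array i) (0, L)).2
    ∧ (((PySem.List.pyRange (i : Int) ((i + k : Nat) : Int) 1).foldl (stepA array i) (0, L)).2 = L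
        ∨ ∃ q : Nat, i < q ∧ q ≤ i + k ∧ Tps array q = Tps array i
            ∧ ((PySem.List.pyRange (i : Int) ((i + k : Nat) : Int) 1).foldl (stepA array i) (0, L)).2 = (q : Int) - (i : Int))
    ∧ (∀ q : Nat, i < q → q ≤ i + k → Tps array q = Tps array i →
        (q : Int) - (i : Int) ≤ ((PySem.List.pyRange (i : Int) ((i + k : Nat) : Int) 1).foldl (stepA array i) (0, L)).2) := by
  intro k
  induction k with
  | zero =>
    intro _
    rw [show (((i + 0 : Nat)) : Int) = (i : Int) by norm_num,
        PySem.List.pyRange_one_eq_nil (le_refl _)]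
    refine ⟨by simp, le_refl _, Or.inl rfl, ?_⟩
    intro q h1 h2 _; omega
  | succ k ih =>
    intro hk
    have hk' : i + k ≤ array.length := by omega
    obtain ⟨ih1, ih2, ih3, ih4⟩ := ih hk'
    have hsplit : PySem.List.pyRange (i : Int) ((i + (k+1) : Nat) : Int) 1
        = PySem.List.pyRange (i : Int) ((i + k : Nat) : Int) 1 ++ [((i + k : Nat) : Int)] := by
      rw [show (((i + (k+1) : Nat)) : Int) = ((i + k : Nat) : Int) + 1 by push_cast; ring]
      exact PySem.List.pyRange_one_succ_right (by push_cast; omega)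
    rw [hsplit, List.foldl_append]
    set r := (PySem.List.pyRange (i : Int) ((i + k : Nat) : Int) 1).foldl (stepA array i) (0, L) with hr
    have hm : i + k < array.length := by omega
    have hget : PySem.List.pyGetD array ((i + k : Nat) : Int) 0 = array[i+k] := by
      rw [PySem.List.pyGetD_natCast, List.getD_eq_getElem?_getD, List.getElem?_eq_getElem hm]
      rfl
    have hcs : r.1 + PySem.List.pyGetD array ((i + k : Nat) : Int) 0
        = Tps array (i+k+1) - Tps array i := by
      rw [hget, ih1, Tps_succ array (i+k) hm]; ring
    simp only [List.foldl_cons, List.foldl_nil, stepA]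
    split_ifs with hz
    · have hTeq : Tps array (i+k+1) = Tps array i := by omega
      refine ⟨hcs, ?_, ?_, ?_⟩
      · exact le_trans ih2 (le_max_left _ _)
      · rcases ih3 with h | ⟨q, hq1, hq2, hq3, hq4⟩
        · rcases max_choice r.2 (((i + k : Nat) : Int) - (i : Int) + 1) with hmx | hmx
          · left; show max _ _ = L; rw [hmx, h]
          · right
            exact ⟨i+k+1, by omega, by omega, hTeq, by show max _ _ = _; rw [hmx]; push_cast; ring⟩
        · right
          rcases max_choice r.2 (((i + k : Nat) : Int) - (i : Int) + 1) with hmx | hmx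
          · exact ⟨q, hq1, by omega, hq3, by show max _ _ = _; rw [hmx, hq4]⟩
          · exact ⟨i+k+1, by omega, by omega, hTeq, by show max _ _ = _; rw [hmx]; push_cast; ring⟩
      · intro q h1 h2 h3
        rcases Nat.lt_or_ge q (i+k+1) with h | h
        · exact le_trans (ih4 q h1 (by omega) h3) (le_max_left _ _)
        · have hq : q = i+k+1 := by omega
          subst hq
          exact le_trans (by push_cast; omega) (le_max_right r.2 _)
    · refine ⟨hcs, ih2, ?_, ?_⟩
      · rcases ih3 with h | ⟨q, hq1, hq2, hq3, hq4⟩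
        · exact Or.inl h
        · exact Or.inr ⟨q, hq1, by omega, hq3, hq4⟩
      · intro q h1 h2 h3
        rcases Nat.lt_or_ge q (i+k+1) with h | h
        · exact ih4 q h1 (by omega) h3
        · have hq : q = i+k+1 := by omega
          subst hq
          exact absurd hcs (by rw [h3]; intro hcc; omega)

theorem outerA (array : List Int) :
    ∀ k : Nat, k ≤ array.length →
    (0 ≤ (PySem.List.pyRange 0 ((k : Nat) : Int) 1).foldl
        (fun L i => ((PySem.List.pyRange i (PySem.List.len array) 1).foldl (stepA array i) (0, L)).2) 0)
    ∧ ((PySem.List.pyRange 0 ((k : Nat) : Int) 1).foldl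
        (fun L i => ((PySem.List.pyRange i (PySem.List.len array) 1).foldl (stepA array i) (0, L)).2) 0 = 0
        ∨ GoodLen array ((PySem.List.pyRange 0 ((k : Nat) : Int) 1).foldl
        (fun L i => ((PySem.List.pyRange i (PySem.List.len array) 1).foldl (stepA array i) (0, L)).2) 0))
    ∧ (∀ p q : Nat, p < k → p < q → q ≤ array.length → Tps array p = Tps array q →
        (q : Int) - (p : Int) ≤ (PySem.List.pyRange 0 ((k : Nat) : Int) 1).foldl
        (fun L i => ((PySem.List.pyRange i (PySem.List.len array) 1).foldl (stepA array i) (0, L)).2) 0) := by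
  intro k
  induction k with
  | zero =>
    intro _
    rw [show (((0 : Nat)) : Int) = (0 : Int) by norm_num, PySem.List.pyRange_one_eq_nil (le_refl _)]
    exact ⟨le_refl _, Or.inl rfl, by intro p q h; omega⟩
  | succ k ih =>
    intro hk
    obtain ⟨ih1, ih2, ih3⟩ := ih (by omega)
    have hsplit : PySem.List.pyRange 0 ((k+1 : Nat) : Int) 1
        = PySem.List.pyRange 0 ((k : Nat) : Int) 1 ++ [((k : Nat) : Int)] := by
      rw [show (((k+1 : Nat)) : Int) = ((k : Nat) : Int) + 1 by push_cast; ring]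
      exact PySem.List.pyRange_one_succ_right (by omega)
    rw [hsplit, List.foldl_append]
    set R := (PySem.List.pyRange 0 ((k : Nat) : Int) 1).foldl
        (fun L i => ((PySem.List.pyRange i (PySem.List.len array) 1).foldl (stepA array i) (0, L)).2) 0 with hR
    simp only [List.foldl_cons, List.foldl_nil]
    have hlen : PySem.List.len array = ((k + (array.length - k) : Nat) : Int) := by
      rw [PySem.List.len_eq]; congr 1; omega
    rw [hlen]
    have hle : k + (array.length - k) = array.length := by omega
    obtain ⟨-, in2, in3, in4⟩ := innerA array k R (array.length - k) (by omega)
    refine ⟨le_trans ih1 in2, ?_, ?_⟩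
    · rcases in3 with h | ⟨q, hq1, hq2, hq3, hq4⟩
      · rw [h]; exact ih2
      · right; exact ⟨k, q, hq1, hle ▸ hq2, hq3.symm, hq4⟩
    · intro p q hp hpq hq hT
      rcases Nat.lt_or_ge p k with h | h
      · exact le_trans (ih3 p q h hpq hq hT) in2
      · have : p = k := by omega
        subst this
        exact in4 q hpq (by omega) hT.symm

def stepB (st : PySem.Dict Int Int × Int × Int) (ix : Int × Int) : PySem.Dict Int Int × Int × Int :=
  let prefx := st.2.1 + ix.2
  match st.1.get? prefx with
  | some f => (st.1, prefx, max st.2.2 (ix.1 - f))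
  | none => (st.1.insert prefx ix.1, prefx, st.2.2)

theorem find?_range_min {p : Nat → Bool} {n t : Nat} (h : (List.range n).find? p = some t) :
    p t = true ∧ t < n ∧ ∀ s, s < t → p s = false := by
  have hmem := List.mem_of_find?_eq_some h
  rw [List.find?_eq_some_iff_getElem] at h
  obtain ⟨hp, i, hi, hb, hmin⟩ := h
  rw [List.getElem_range] at hb
  subst hb
  refine ⟨hp, by simpa using hmem, ?_⟩
  intro s hs
  have := hmin s (by omega)
  rwa [List.getElem_range, Bool.not_eq_eq_eq_not, Bool.not_true] at this

theorem find?_range_succ_of_ne (array : List Int) (k : Nat) (v : Int)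
    (hv : Tps array (k+1) ≠ v) :
    (List.range (k+2)).find? (fun t => Tps array t == v)
      = (List.range (k+1)).find? (fun t => Tps array t == v) := by
  rw [show k+2 = (k+1)+1 from rfl, List.range_succ, List.find?_append]
  rcases hG : (List.range (k+1)).find? (fun t => Tps array t == v) with _ | s
  · simp [hv]
  · rfl

theorem find?_range_succ_of_some {p : Nat → Bool} {k s : Nat}
    (h : (List.range (k+1)).find? p = some s) :
    (List.range (k+2)).find? p = some s := by
  rw [show k+2 = (k+1)+1 from rfl, List.range_succ, List.find?_append, h]
  rfl

theorem invB (array : List Int) :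
    ∀ k : Nat, k ≤ array.length →
    (((PySem.List.enumerate (array.take k) 0).foldl stepB
        ((PySem.Dict.empty : PySem.Dict Int Int).insert 0 (-1), 0, 0)).2.1 = Tps array k)
    ∧ (∀ v : Int, ((PySem.List.enumerate (array.take k) 0).foldl stepB
        ((PySem.Dict.empty : PySem.Dict Int Int).insert 0 (-1), 0, 0)).1.get? v
        = ((List.range (k+1)).find? (fun t => Tps array t == v)).map (fun t => (t : Int) - 1))
    ∧ (0 ≤ ((PySem.List.enumerate (array.take k) 0).foldl stepB
        ((PySem.Dict.empty : PySem.Dict Int Int).insert 0 (-1), 0, 0)).2.2)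
    ∧ (((PySem.List.enumerate (array.take k) 0).foldl stepB
        ((PySem.Dict.empty : PySem.Dict Int Int).insert 0 (-1), 0, 0)).2.2 = 0
        ∨ ∃ p q : Nat, p < q ∧ q ≤ k ∧ Tps array p = Tps array q
            ∧ ((PySem.List.enumerate (array.take k) 0).foldl stepB
        ((PySem.Dict.empty : PySem.Dict Int Int).insert 0 (-1), 0, 0)).2.2 = (q : Int) - (p : Int))
    ∧ (∀ p q : Nat, p < q → q ≤ k → Tps array p = Tps array q →
        (q : Int) - (p : Int) ≤ ((PySem.List.enumerate (array.take k) 0).foldl stepB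
        ((PySem.Dict.empty : PySem.Dict Int Int).insert 0 (-1), 0, 0)).2.2) := by
  intro k
  induction k with
  | zero =>
    intro _
    simp only [List.take_zero, PySem.List.enumerate_nil, List.foldl_nil]
    have hT0 : Tps array 0 = 0 := by simp [Tps]
    refine ⟨by simp [hT0], ?_, le_refl _, by left; trivial, by intro p q h1 h2 _; omega⟩
    intro v
    by_cases hv : v = 0
    · subst hv
      rw [PySem.Dict.get?_insert_self]
      simp [List.range_succ, hT0]
    · rw [PySem.Dict.get?_insert_of_ne _ _ hv]
      simp [List.range_succ, hT0, Ne.symm hv]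
  | succ k ih =>
    intro hk
    have hm : k < array.length := by omega
    obtain ⟨ih1, ih2, ih3, ih4, ih5⟩ := ih (by omega)
    have htake : array.take (k+1) = array.take k ++ [array[k]] := by
      rw [List.take_add_one, List.getElem?_eq_getElem hm]
      rfl
    have hlen : (array.take k).length = k := by simp [List.length_take]; omega
    have henum : PySem.List.enumerate (array.take (k+1)) 0
        = PySem.List.enumerate (array.take k) 0 ++ [(((k : Nat) : Int), array[k])] := by
      rw [htake, PySem.List.enumerate_append, hlen]
      simp [PySem.List.enumerate_cons, PySem.List.enumerate_nil]
    rw [henum, List.foldl_append]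
    set st := (PySem.List.enumerate (array.take k) 0).foldl stepB
        ((PySem.Dict.empty : PySem.Dict Int Int).insert 0 (-1), 0, 0) with hst
    simp only [List.foldl_cons, List.foldl_nil]
    have hpref : st.2.1 + array[k] = Tps array (k+1) := by
      rw [ih1, Tps_succ array k hm]
    -- the lookup of the new prefix sum
    have hlook : st.1.get? (st.2.1 + array[k])
        = ((List.range (k+1)).find? (fun t => Tps array t == Tps array (k+1))).map
            (fun t => (t : Int) - 1) := by
      rw [hpref, ih2]
    rcases hF : (List.range (k+1)).find? (fun t => Tps array t == Tps array (k+1)) with _ | t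
    · -- no earlier occurrence: new key inserted
      rw [hF] at hlook; simp at hlook
      have hnone : ∀ s : Nat, s ≤ k → Tps array s ≠ Tps array (k+1) := by
        intro s hs
        have := List.find?_eq_none.mp hF s (by simp [List.mem_range]; omega)
        simpa using this
      simp only [stepB, hlook]
      refine ⟨hpref, ?_, ih3, ?_, ?_⟩
      · intro v
        by_cases hv : v = Tps array (k+1)
        · subst hv
          rw [hpref, PySem.Dict.get?_insert_self]
          have h2 : (List.range (k+2)).find? (fun t => Tps array t == Tps array (k+1))
              = some (k+1) := by
            rw [show k+2 = (k+1)+1 from rfl, List.range_succ, List.find?_append, hF]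
            simp
          rw [h2]
          simp
        · rw [hpref, PySem.Dict.get?_insert_of_ne _ _ hv, ih2 v,
              find?_range_succ_of_ne array k v (fun h => hv h.symm)]
      · rcases ih4 with h | ⟨p, q, h1, h2, h3, h4⟩
        · exact Or.inl h
        · exact Or.inr ⟨p, q, h1, by omega, h3, h4⟩
      · intro p q h1 h2 h3
        rcases Nat.lt_or_ge q (k+1) with h | h
        · exact ih5 p q h1 (by omega) h3
        · have hq : q = k+1 := by omega
          subst hq
          exact absurd h3 (hnone p (by omega))
    · -- first occurrence t found
      rw [hF] at hlook; simp at hlook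
      obtain ⟨hpt, htk, hmin⟩ := find?_range_min hF
      have hTt : Tps array t = Tps array (k+1) := by simpa using hpt
      simp only [stepB, hlook]
      refine ⟨hpref, ?_, le_trans ih3 (le_max_left _ _), ?_, ?_⟩
      · intro v
        rw [ih2 v]
        rcases hG : (List.range (k+1)).find? (fun t => Tps array t == v) with _ | s
        · have hv : Tps array (k+1) ≠ v := by
            intro hv
            subst hv
            simp [hF] at hG
          rw [find?_range_succ_of_ne array k v hv, hG]
        · rw [show k+1+1 = k+2 from rfl, find?_range_succ_of_some hG]
      · rcases max_choice st.2.2 (((k : Nat) : Int) - ((t : Int) - 1)) with hmx | hmx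
        · rw [hmx]
          rcases ih4 with h | ⟨p, q, h1, h2, h3, h4⟩
          · exact Or.inl h
          · exact Or.inr ⟨p, q, h1, by omega, h3, h4⟩
        · rw [hmx]
          exact Or.inr ⟨t, k+1, by omega, le_refl _, hTt, by push_cast; ring⟩
      · intro p q h1 h2 h3
        rcases Nat.lt_or_ge q (k+1) with h | h
        · exact le_trans (ih5 p q h1 (by omega) h3) (le_max_left _ _)
        · have hq : q = k+1 := by omega
          subst hq
          have htp : t ≤ p := by
            by_contra hc
            have := hmin p (by omega)
            rw [h3] at this
            simp at this
          refine le_trans ?_ (le_max_right st.2.2 _)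
          push_cast
          omega

-- o is the maximum zero-sum subarray length (0 if none)
def IsBest (array : List Int) (o : Int) : Prop :=
  0 ≤ o ∧ (o = 0 ∨ GoodLen array o) ∧ ∀ d, GoodLen array d → d ≤ o

theorem goodLen_pos {array : List Int} {d : Int} (h : GoodLen array d) : 1 ≤ d := by
  obtain ⟨p, q, hpq, _, _, hd⟩ := h
  omega

theorem isBest_unique {array : List Int} {o₁ o₂ : Int}
    (h₁ : IsBest array o₁) (h₂ : IsBest array o₂) : o₁ = o₂ := by
  obtain ⟨hn₁, hc₁, hub₁⟩ := h₁
  obtain ⟨hn₂, hc₂, hub₂⟩ := h₂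
  rcases hc₁ with h | h <;> rcases hc₂ with h' | h'
  · omega
  · have := hub₁ _ h'; have := goodLen_pos h'; omega
  · have := hub₂ _ h; have := goodLen_pos h; omega
  · have := hub₁ _ h'; have := hub₂ _ h; omega

theorem A_isBest (array : List Int) : IsBest array (longest_subarry_with_zero_sum array) := by
  have h := outerA array array.length (le_refl _)
  rw [show ((array.length : Nat) : Int) = PySem.List.len array from (PySem.List.len_eq array).symm] at h
  obtain ⟨h1, h2, h3⟩ := h
  refine ⟨h1, h2, ?_⟩
  intro d hd
  obtain ⟨p, q, hpq, hq, hT, hdv⟩ := hd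
  subst hdv
  exact h3 p q (by omega) hpq hq hT

theorem B_isBest (array : List Int) : IsBest array (longest_subarry_with_zero_sum_alt array) := by
  obtain ⟨-, -, h3, h4, h5⟩ := invB array array.length (le_refl _)
  rw [List.take_length] at h3 h4 h5
  refine ⟨h3, ?_, ?_⟩
  · rcases h4 with h | ⟨p, q, h1, h2, hT, hv⟩
    · exact Or.inl h
    · exact Or.inr ⟨p, q, h1, h2, hT, hv⟩
  · intro d hd
    obtain ⟨p, q, hpq, hq, hT, hdv⟩ := hd
    subst hdv
    exact h5 p q hpq hq hT

-- ===== VERDICT (by name: the statement is the Claim_ definition above) =====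
theorem longest_subarry_with_zero_sum_spec : Claim_equal_longest_subarry_with_zero_sum := by
  intro array _
  exact isBest_unique (A_isBest array) (B_isBest array)
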